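-- pv_equiv track=rewrite | github.com/bridges123/kpfupakbot | bot.py | check_snils
-- ===== SOURCE A (Python) =====
-- def check_snils(answer):
--     slices = answer.split('-')
--     if len(slices) == 1:
--         if 5 <= len(answer) <= 7:
--             return True
--         else:
--             return False
--     elif len(slices) == 4:
--         if len(slices[0]) == 3 and len(slices[1]) == 3 and len(slices[2]) == 3 and len(slices[3]) == 2:
--             for s in slices[0]:
--                 if not('0' <= s <= '9'):
--                     return False
--             for s in slices[1]:
--                 if not('0' <= s <= '9'):
--                     return False
--             for s in slices[2]:
--                 if not('0' <= s <= '9'):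
--                     return False
--             for s in slices[3]:
--                 if not('0' <= s <= '9'):
--                     return False
--             return True
--         else:
--             return False
-- ===== SOURCE B (Python) =====
-- def check_snils(answer):
--     slices = answer.split('-')
--     if len(slices) == 1:
--         return 5 <= len(answer) <= 7
--     elif len(slices) == 4:
--         # fixed-shape positional scan: 14 chars, dashes exactly at 3, 7, 11,
--         # ASCII digits everywhere else ('0' <= c <= '9', never str.isdigit)
--         return (len(answer) == 14 and
--                 all(answer[i] == '-' if i in (3, 7, 11) else '0' <= answer[i] <= '9'
--                     for i in range(14)))
-- ===== Notes on version B (the rewrite author's own statement) =====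
-- stated objective: idiomatic
-- what changed: The four-part branch's lengths-3-3-3-2 test plus four separate digit loops over the split pieces is replaced by one positional scan of the whole string: length 14, dashes exactly at indices 3/7/11, ASCII digits everywhere else; the split result is only used to count parts.
import Mathlib
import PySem

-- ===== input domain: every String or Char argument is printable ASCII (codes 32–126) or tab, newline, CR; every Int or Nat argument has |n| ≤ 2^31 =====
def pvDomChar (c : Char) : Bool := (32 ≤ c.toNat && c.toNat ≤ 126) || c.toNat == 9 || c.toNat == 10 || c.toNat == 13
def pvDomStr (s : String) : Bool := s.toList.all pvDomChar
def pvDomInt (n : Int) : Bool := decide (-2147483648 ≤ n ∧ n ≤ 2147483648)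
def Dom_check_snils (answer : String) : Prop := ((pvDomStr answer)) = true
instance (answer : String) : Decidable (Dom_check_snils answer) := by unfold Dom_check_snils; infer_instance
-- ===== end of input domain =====

-- ===== PORT A =====
-- B changes only the four-part branch: one positional scan of the string replaces the
-- per-piece length tests and four digit loops (objective: idiomatic; no speed claim).
-- Python's '0' <= s <= '9' on a char; used verbatim by both ports.
def digitB (c : Char) : Bool := decide ('0' ≤ c) && decide (c ≤ '9')

def check_snils (answer : String) : Option Bool :=
  -- answer.split('-') with a nonempty literal separator is exactly Chars.splitOn
  let slices := PySem.Chars.splitOn answer.toList ['-']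
  if slices.length = 1 then
    if 5 ≤ answer.toList.length ∧ answer.toList.length ≤ 7 then some true else some false
  else if slices.length = 4 then
    -- slices[i] for i < 4 is in range here (length = 4), so getD is exact
    if (slices.getD 0 []).length = 3 ∧ (slices.getD 1 []).length = 3 ∧
       (slices.getD 2 []).length = 3 ∧ (slices.getD 3 []).length = 2 then
      -- each 'for s in slices[i]: if not('0' <= s <= '9'): return False' early-return loop
      if (slices.getD 0 []).all digitB then
        if (slices.getD 1 []).all digitB then
          if (slices.getD 2 []).all digitB then
            if (slices.getD 3 []).all digitB then some true
            else some false
          else some false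
        else some false
      else some false
    else some false
  else none

-- ===== PORT B =====
def check_snils_alt (answer : String) : Option Bool :=
  let slices := PySem.Chars.splitOn answer.toList ['-']
  if slices.length = 1 then
    some (decide (5 ≤ answer.toList.length ∧ answer.toList.length ≤ 7))
  else if slices.length = 4 then
    -- 'len(answer) == 14 and all(answer[i] == '-' if i in (3,7,11) else '0' <= answer[i] <= '9'
    --  for i in range(14))'; under the length guard every i < 14 is in range, so getD is exact
    some (decide (answer.toList.length = 14) &&
      (List.range 14).all (fun i =>
        if i = 3 ∨ i = 7 ∨ i = 11 then answer.toList.getD i ' ' == '-'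
        else digitB (answer.toList.getD i ' ')))
  else none

-- ===== PRECONDITION & SPEC =====
def Spec_check_snils (answer : String) (out : Option Bool) : Prop := out = check_snils_alt answer
instance (answer : String) (out : Option Bool) : Decidable (Spec_check_snils answer out) := by unfold Spec_check_snils; infer_instance

-- ===== CLAIM (what is proved, stated in full; the proofs are below) =====
def Claim_equal_check_snils : Prop := ∀ (answer : String), Dom_check_snils answer → Spec_check_snils answer (check_snils answer)

-- ===== LEMMAS AND PROOFS =====

-- simple structural model of s.split('-')
def splitDash : List Char → List (List Char)
  | [] => [[]]
  | c :: l => if c = '-' then [] :: splitDash l else (splitDash l).modifyHead (c :: ·)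

theorem splitDash_ne_nil (l : List Char) : splitDash l ≠ [] := by
  induction l with
  | nil => simp [splitDash]
  | cons c l ih =>
    simp only [splitDash]
    split_ifs
    · simp
    · cases h : splitDash l with
      | nil => exact absurd h ih
      | cons p ps => simp

theorem go_dash (fuel : Nat) (l cur : List Char) (acc : List (List Char)) :
    PySem.Chars.splitOn.go ['-'] (fuel+1) ('-'::l) cur acc
      = PySem.Chars.splitOn.go ['-'] fuel l [] (cur.reverse :: acc) := by
  rw [PySem.Chars.splitOn.go]; simp

theorem go_other (fuel : Nat) (c : Char) (h : c ≠ '-') (l cur : List Char) (acc : List (List Char)) :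
    PySem.Chars.splitOn.go ['-'] (fuel+1) (c::l) cur acc
      = PySem.Chars.splitOn.go ['-'] fuel l (c::cur) acc := by
  rw [PySem.Chars.splitOn.go]
  simp [List.isPrefixOf, Ne.symm h]

theorem go_nil (fuel : Nat) (cur : List Char) (acc : List (List Char)) :
    PySem.Chars.splitOn.go ['-'] fuel [] cur acc = (cur.reverse :: acc).reverse := by
  cases fuel <;> rw [PySem.Chars.splitOn.go] <;> simp

theorem go_eq (l : List Char) : ∀ fuel, l.length ≤ fuel → ∀ (cur : List Char) (acc : List (List Char)),
    PySem.Chars.splitOn.go ['-'] fuel l cur acc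
      = acc.reverse ++ (splitDash l).modifyHead (cur.reverse ++ ·) := by
  induction l with
  | nil => intro fuel _ cur acc; rw [go_nil]; simp [splitDash]
  | cons c l ih =>
    intro fuel hf cur acc
    cases fuel with
    | zero => simp at hf
    | succ f =>
      by_cases hc : c = '-'
      · subst hc
        rw [go_dash, ih f (by simpa using hf)]
        simp only [splitDash]
        rw [if_pos trivial]
        cases h : splitDash l with
        | nil => exact absurd h (splitDash_ne_nil l)
        | cons p ps => simp
      · rw [go_other f c hc, ih f (by simpa using hf)]
        simp only [splitDash, if_neg hc]
        cases h : splitDash l with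
        | nil => exact absurd h (splitDash_ne_nil l)
        | cons p ps => simp

theorem splitOn_eq (l : List Char) : PySem.Chars.splitOn l ['-'] = splitDash l := by
  rw [PySem.Chars.splitOn, go_eq l (l.length + 1) (by omega)]
  cases h : splitDash l with
  | nil => exact absurd h (splitDash_ne_nil l)
  | cons p ps => simp

def joinD : List (List Char) → List Char
  | [] => []
  | [p] => p
  | p :: ps => p ++ '-' :: joinD ps

theorem joinD_splitDash (l : List Char) : joinD (splitDash l) = l := by
  induction l with
  | nil => simp [splitDash, joinD]
  | cons c l ih =>
    simp only [splitDash]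
    split_ifs with hc
    · subst hc
      cases h : splitDash l with
      | nil => exact absurd h (splitDash_ne_nil l)
      | cons p ps => rw [h] at ih; simp [joinD, ← ih]
    · cases h : splitDash l with
      | nil => exact absurd h (splitDash_ne_nil l)
      | cons p ps =>
        rw [h] at ih
        cases ps with
        | nil => simpa [joinD] using congrArg (c :: ·) ih
        | cons q qs => simpa [joinD] using congrArg (c :: ·) ih

theorem noDash (l : List Char) : ∀ p ∈ splitDash l, '-' ∉ p := by
  induction l with
  | nil => simp [splitDash]
  | cons c l ih =>
    simp only [splitDash]
    split_ifs with hc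
    · intro p hp
      rcases List.mem_cons.mp hp with h | h
      · subst h; simp
      · exact ih p h
    · cases h : splitDash l with
      | nil => exact absurd h (splitDash_ne_nil l)
      | cons q qs =>
        intro p hp
        rcases List.mem_cons.mp hp with h' | h'
        · subst h'
          intro hm
          rcases List.mem_cons.mp hm with h'' | h''
          · exact hc h''.symm
          · exact ih q (h ▸ List.mem_cons_self) h''
        · exact ih p (h ▸ List.mem_cons_of_mem q h')

theorem sd_four {l a b c d : List Char} (h : splitDash l = [a, b, c, d]) :
    l = a ++ '-' :: (b ++ '-' :: (c ++ '-' :: d)) := by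
  have := joinD_splitDash l
  rw [h] at this
  simpa [joinD] using this.symm

-- getD over the joined shape
theorem getD_join_left (a rest : List Char) (i : Nat) (h : i < a.length) :
    (a ++ rest).getD i ' ' = a.getD i ' ' :=
  List.getD_append a rest ' ' i h

theorem getD_join_dash (a rest : List Char) :
    (a ++ '-' :: rest).getD a.length ' ' = '-' := by
  rw [List.getD_append_right a _ ' ' a.length (le_refl _)]
  simp

theorem getD_join_shift (a rest : List Char) (j : Nat) :
    (a ++ '-' :: rest).getD (a.length + 1 + j) ' ' = rest.getD j ' ' := by
  rw [List.getD_append_right a _ ' ' _ (by omega)]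
  have : a.length + 1 + j - a.length = j + 1 := by omega
  rw [this, List.getD_cons_succ]

theorem getD_mem' (l : List Char) (i : Nat) (h : i < l.length) : l.getD i ' ' ∈ l := by
  rw [List.getD_eq_getElem l ' ' h]
  exact List.getElem_mem h

theorem digitB_dash : digitB '-' = false := by decide

-- B's positional scan, unfolded over range 14
theorem range14 : List.range 14 = [0,1,2,3,4,5,6,7,8,9,10,11,12,13] := by decide

-- the shape argument: if B's scan accepts a four-part join of dash-free pieces,
-- the pieces have lengths 3, 3, 3, 2
theorem shape (a b c d : List Char)
    (ha : '-' ∉ a) (hb : '-' ∉ b) (hc : '-' ∉ c)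
    (h14 : (a ++ '-' :: (b ++ '-' :: (c ++ '-' :: d))).length = 14)
    (hstep : ∀ i < 14,
      (if i = 3 ∨ i = 7 ∨ i = 11
        then (a ++ '-' :: (b ++ '-' :: (c ++ '-' :: d))).getD i ' ' == '-'
        else digitB ((a ++ '-' :: (b ++ '-' :: (c ++ '-' :: d))).getD i ' ')) = true) :
    a.length = 3 ∧ b.length = 3 ∧ c.length = 3 ∧ d.length = 2 := by
  set L := a ++ '-' :: (b ++ '-' :: (c ++ '-' :: d)) with hL
  have hlen : a.length + b.length + c.length + d.length + 3 = 14 := by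
    have := h14; simp [hL, List.length_append] at this; omega
  -- positions inside a piece are not dashes
  have inA : ∀ i < a.length, L.getD i ' ' ≠ '-' := by
    intro i hi
    rw [hL, getD_join_left a _ i hi]
    exact fun h => ha (h ▸ getD_mem' a i hi)
  have inB : ∀ i < b.length, L.getD (a.length + 1 + i) ' ' ≠ '-' := by
    intro i hi
    rw [hL, getD_join_shift, getD_join_left b _ i hi]
    exact fun h => hb (h ▸ getD_mem' b i hi)
  have inC : ∀ i < c.length, L.getD (a.length + 1 + (b.length + 1 + i)) ' ' ≠ '-' := by
    intro i hi
    rw [hL, getD_join_shift, getD_join_shift, getD_join_left c _ i hi]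
    exact fun h => hc (h ▸ getD_mem' c i hi)
  -- the three dash positions
  have dash1 : L.getD a.length ' ' = '-' := by rw [hL]; exact getD_join_dash _ _
  have dash2 : L.getD (a.length + 1 + b.length) ' ' = '-' := by
    rw [hL, getD_join_shift]; exact getD_join_dash _ _
  have dash3 : L.getD (a.length + 1 + (b.length + 1 + c.length)) ' ' = '-' := by
    rw [hL, getD_join_shift, getD_join_shift]; exact getD_join_dash _ _
  -- a dash position must be one of 3, 7, 11
  have dashpos : ∀ k < 14, L.getD k ' ' = '-' → k = 3 ∨ k = 7 ∨ k = 11 := by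
    intro k hk hd
    by_contra hno
    have := hstep k hk
    rw [if_neg hno, hd, digitB_dash] at this
    exact Bool.false_ne_true this
  -- and positions 3, 7, 11 hold dashes
  have dashat : ∀ k, (k = 3 ∨ k = 7 ∨ k = 11) → L.getD k ' ' = '-' := by
    intro k hk
    have := hstep k (by rcases hk with h|h|h <;> omega)
    rw [if_pos hk] at this
    exact beq_iff_eq.mp this
  have hA : a.length = 3 := by
    have h1 := dashpos a.length (by omega) dash1
    rcases h1 with h | h | h
    · exact h
    all_goals exact absurd (dashat 3 (by omega)) (inA 3 (by omega))
  have hB : b.length = 3 := by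
    have h1 := dashpos (a.length + 1 + b.length) (by omega) dash2
    rcases h1 with h | h | h
    · omega
    · omega
    · -- a.length + 1 + b.length = 11, so b.length = 7: position 7 = a.length + 1 + 3 lies inside b
      have h7 : (7 : Nat) = a.length + 1 + 3 := by omega
      exact absurd (h7 ▸ dashat 7 (by omega)) (inB 3 (by omega))
  have hC : c.length = 3 := by
    have h1 := dashpos (a.length + 1 + (b.length + 1 + c.length)) (by omega) dash3
    omega
  exact ⟨hA, hB, hC, by omega⟩

theorem check_snils_spec' : ∀ (answer : String), check_snils answer = check_snils_alt answer := by
  intro answer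
  unfold check_snils check_snils_alt
  simp only [splitOn_eq]
  by_cases h1 : (splitDash answer.toList).length = 1
  · rw [if_pos h1, if_pos h1]
    split_ifs with h
    · rw [decide_eq_true h]
    · rw [decide_eq_false h]
  · by_cases h4 : (splitDash answer.toList).length = 4
    · obtain ⟨a, b, c, d, hsd⟩ := List.length_eq_four.mp h4
      have hl : answer.toList = a ++ '-' :: (b ++ '-' :: (c ++ '-' :: d)) := sd_four hsd
      have ha : '-' ∉ a := noDash _ a (by rw [hsd]; simp)
      have hb : '-' ∉ b := noDash _ b (by rw [hsd]; simp)
      have hc : '-' ∉ c := noDash _ c (by rw [hsd]; simp)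
      rw [if_neg h1, if_neg h1, if_pos h4, if_pos h4, hsd]
      simp only [List.getD_cons_zero, List.getD_cons_succ]
      by_cases hlen : a.length = 3 ∧ b.length = 3 ∧ c.length = 3 ∧ d.length = 2
      · obtain ⟨hA, hB, hC, hD⟩ := hlen
        obtain ⟨x0, x1, x2, rfl⟩ := List.length_eq_three.mp hA
        obtain ⟨y0, y1, y2, rfl⟩ := List.length_eq_three.mp hB
        obtain ⟨z0, z1, z2, rfl⟩ := List.length_eq_three.mp hC
        obtain ⟨w0, w1, rfl⟩ := List.length_eq_two.mp hD
        rw [hl, if_pos (by norm_num)]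
        simp only [range14, List.all_cons, List.all_nil, List.cons_append, List.nil_append]
        norm_num
        split_ifs <;> simp_all
      · rw [if_neg hlen]
        cases hfull : (decide (answer.toList.length = 14) &&
            (List.range 14).all fun i =>
              if i = 3 ∨ i = 7 ∨ i = 11 then answer.toList.getD i ' ' == '-'
              else digitB (answer.toList.getD i ' ')) with
        | false => rfl
        | true =>
          rw [Bool.and_eq_true] at hfull
          have h14 : (a ++ '-' :: (b ++ '-' :: (c ++ '-' :: d))).length = 14 := by
            rw [← hl]; exact of_decide_eq_true hfull.1
          have hstep : ∀ i < 14,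
              (if i = 3 ∨ i = 7 ∨ i = 11
                then (a ++ '-' :: (b ++ '-' :: (c ++ '-' :: d))).getD i ' ' == '-'
                else digitB ((a ++ '-' :: (b ++ '-' :: (c ++ '-' :: d))).getD i ' ')) = true := by
            intro i hi
            rw [← hl]
            exact List.all_eq_true.mp hfull.2 i (List.mem_range.mpr hi)
          exact absurd (shape a b c d ha hb hc h14 hstep) hlen
    · simp [h1, h4]

-- ===== VERDICT (by name: the statement is the Claim_ definition above) =====
theorem check_snils_spec : Claim_equal_check_snils := by
  intro answer _
  unfold Spec_check_snils
  exact check_snils_spec' answer
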